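-- pv_equiv track=rewrite | github.com/angelalonso/gtr2 | dyn_ai/core/autopilot.py | get_vehicle_class
-- ===== SOURCE A (Python) =====
-- from typing import Optional, Dict, List, Tuple, Set, Any
--
-- def get_vehicle_class(vehicle_name: str, mapping: Dict) -> str:
--     """Get class for vehicle"""
--     if not vehicle_name:
--         return "Unknown"
--
--     vehicle_lower = vehicle_name.lower().strip()
--
--     for class_name, class_data in mapping.items():
--         for v in class_data.get("vehicles", []):
--             if v.lower() == vehicle_lower:
--                 return class_name
--
--     for class_name, class_data in mapping.items():
--         for v in class_data.get("vehicles", []):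
--             if v.lower() in vehicle_lower or vehicle_lower in v.lower():
--                 return class_name
--
--     return vehicle_name
-- ===== SOURCE B (Python) =====
-- def get_vehicle_class(vehicle_name: str, mapping) -> str:
--     """Get class for vehicle: single pass, exact match returns immediately,
--     first substring match is remembered as a fallback candidate."""
--     if not vehicle_name:
--         return "Unknown"
--     vehicle_lower = vehicle_name.lower().strip()
--     candidate = None
--     for class_name, class_data in mapping.items():
--         for v in class_data.get("vehicles", []):
--             lv = v.lower()
--             if lv == vehicle_lower:
--                 return class_name
--             if candidate is None and (lv in vehicle_lower or vehicle_lower in lv):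
--                 candidate = class_name
--     return candidate if candidate is not None else vehicle_name
-- ===== Notes on version B (the rewrite author's own statement) =====
-- stated objective: alternative
-- what changed: Replaces A's two full passes over the mapping (exact pass, then substring pass) by a single pass that returns on the first exact match and remembers the first substring candidate as a fallback.
import Mathlib
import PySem

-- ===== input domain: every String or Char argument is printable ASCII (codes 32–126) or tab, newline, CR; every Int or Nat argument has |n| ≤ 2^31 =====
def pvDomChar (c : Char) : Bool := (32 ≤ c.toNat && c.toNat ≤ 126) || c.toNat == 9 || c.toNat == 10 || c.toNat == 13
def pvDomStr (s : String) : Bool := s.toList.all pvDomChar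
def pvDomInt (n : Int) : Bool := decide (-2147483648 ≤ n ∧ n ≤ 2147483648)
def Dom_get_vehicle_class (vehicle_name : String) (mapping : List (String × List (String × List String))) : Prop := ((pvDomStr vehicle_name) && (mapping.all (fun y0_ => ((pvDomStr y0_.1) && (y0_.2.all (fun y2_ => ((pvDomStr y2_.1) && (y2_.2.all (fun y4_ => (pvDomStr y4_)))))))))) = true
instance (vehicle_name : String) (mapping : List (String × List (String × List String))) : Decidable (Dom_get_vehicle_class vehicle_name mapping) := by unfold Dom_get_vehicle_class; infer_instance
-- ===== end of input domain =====

-- B makes one pass over the mapping (exact match returns at once, first substring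
-- match is kept as a fallback) instead of A's two full passes. Return value only.

-- ===== PORT A =====
-- A's first loop: 'for v in vehicles: if v.lower() == vehicle_lower: return class_name'
def pvA_exactIn (vl : String) : List String → Bool
  | [] => false
  | v :: vs => if PySem.Str.lower v = vl then true else pvA_exactIn vl vs

def pvA_findExact (vl : String) : List (String × List (String × List String)) → Option String
  | [] => none
  | (cn, cd) :: rest =>
      if pvA_exactIn vl (PySem.Dict.getD (PySem.Dict.mk cd) "vehicles" []) then some cn
      else pvA_findExact vl rest

-- A's second loop: 'if v.lower() in vehicle_lower or vehicle_lower in v.lower(): return class_name'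
def pvA_subIn (vl : String) : List String → Bool
  | [] => false
  | v :: vs =>
      if PySem.Str.isIn (PySem.Str.lower v) vl || PySem.Str.isIn vl (PySem.Str.lower v) then true
      else pvA_subIn vl vs

def pvA_findSub (vl : String) : List (String × List (String × List String)) → Option String
  | [] => none
  | (cn, cd) :: rest =>
      if pvA_subIn vl (PySem.Dict.getD (PySem.Dict.mk cd) "vehicles" []) then some cn
      else pvA_findSub vl rest

def get_vehicle_class (vehicle_name : String) (mapping : List (String × List (String × List String))) : String :=
  if vehicle_name = "" then "Unknown"
  else
    let vl := PySem.Str.strip (PySem.Str.lower vehicle_name)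
    match pvA_findExact vl mapping with
    | some c => c
    | none =>
      match pvA_findSub vl mapping with
      | some c => c
      | none => vehicle_name

-- ===== PORT B =====
-- B's inner loop over one class's vehicles: Sum.inl cn = early 'return class_name'
-- on an exact match; Sum.inr cand = loop finished with the candidate so far.
def pvB_scanVeh (vl : String) (cn : String) (cand : Option String) : List String → Sum String (Option String)
  | [] => Sum.inr cand
  | v :: vs =>
      let lv := PySem.Str.lower v
      if lv = vl then Sum.inl cn
      else if cand.isNone && (PySem.Str.isIn lv vl || PySem.Str.isIn vl lv) then
        pvB_scanVeh vl cn (some cn) vs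
      else pvB_scanVeh vl cn cand vs

def pvB_go (vn : String) (vl : String) : List (String × List (String × List String)) → Option String → String
  | [], cand => cand.getD vn
  | (cn, cd) :: rest, cand =>
      match pvB_scanVeh vl cn cand (PySem.Dict.getD (PySem.Dict.mk cd) "vehicles" []) with
      | Sum.inl c => c
      | Sum.inr cand' => pvB_go vn vl rest cand'

def get_vehicle_class_alt (vehicle_name : String) (mapping : List (String × List (String × List String))) : String :=
  if vehicle_name = "" then "Unknown"
  else pvB_go vehicle_name (PySem.Str.strip (PySem.Str.lower vehicle_name)) mapping none

-- ===== PRECONDITION & SPEC =====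
def Spec_get_vehicle_class (vehicle_name : String) (mapping : List (String × List (String × List String))) (out : String) : Prop := out = get_vehicle_class_alt vehicle_name mapping
instance (vehicle_name : String) (mapping : List (String × List (String × List String))) (out : String) : Decidable (Spec_get_vehicle_class vehicle_name mapping out) := by unfold Spec_get_vehicle_class; infer_instance

-- ===== CLAIM (what is proved, stated in full; the proofs are below) =====
def Claim_equal_get_vehicle_class : Prop := ∀ (vehicle_name : String) (mapping : List (String × List (String × List String))), Dom_get_vehicle_class vehicle_name mapping → Spec_get_vehicle_class vehicle_name mapping (get_vehicle_class vehicle_name mapping)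

-- ===== LEMMAS AND PROOFS =====

-- One class: B's scan returns early with cn iff the class has an exact match;
-- otherwise it returns the old candidate, or cn if the class has a substring match.
theorem pvB_scanVeh_eq (vl cn : String) (cand : Option String) (vs : List String) :
    pvB_scanVeh vl cn cand vs =
      (if pvA_exactIn vl vs then Sum.inl cn
       else Sum.inr (if cand.isSome then cand
                     else if pvA_subIn vl vs then some cn else none)) := by
  induction vs generalizing cand with
  | nil => cases cand <;> simp [pvB_scanVeh, pvA_exactIn, pvA_subIn]
  | cons v vs ih =>
    simp only [pvB_scanVeh, pvA_exactIn, pvA_subIn]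
    by_cases hx : PySem.Str.lower v = vl
    · simp [hx]
    · cases cand with
      | some c => simp [hx, ih]
      | none =>
        simp only [hx, ih, Option.isNone_none, Bool.true_and, if_false]
        split_ifs <;> simp_all

-- Whole mapping: B's single pass with candidate 'cand' computes A's two-pass result,
-- with 'cand' taking the place of any substring match.
theorem pvB_go_eq (vn vl : String) (mapping : List (String × List (String × List String)))
    (cand : Option String) :
    pvB_go vn vl mapping cand =
      (match pvA_findExact vl mapping with
       | some c => c
       | none =>
         match cand with
         | some c => c
         | none =>
           match pvA_findSub vl mapping with
           | some c => c
           | none => vn) := by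
  induction mapping generalizing cand with
  | nil => cases cand <;> simp [pvB_go, pvA_findExact, pvA_findSub]
  | cons p rest ih =>
    obtain ⟨cn, cd⟩ := p
    simp only [pvB_go, pvA_findExact, pvA_findSub, pvB_scanVeh_eq]
    by_cases hx : pvA_exactIn vl (PySem.Dict.getD (PySem.Dict.mk cd) "vehicles" []) = true
    · simp [hx]
    · cases cand with
      | some c => simp [hx, ih]
      | none =>
        by_cases hs : pvA_subIn vl (PySem.Dict.getD (PySem.Dict.mk cd) "vehicles" []) = true
        · simp [hx, hs, ih]
        · simp [hx, hs, ih]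

-- ===== VERDICT (by name: the statement is the Claim_ definition above) =====
theorem get_vehicle_class_spec : Claim_equal_get_vehicle_class := by
  intro vn mapping _
  unfold Spec_get_vehicle_class get_vehicle_class get_vehicle_class_alt
  by_cases h : vn = ""
  · simp [h]
  · simp only [h, if_false, pvB_go_eq]
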